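-- pv_equiv track=rewrite | github.com/LouieMjr/python-LS | py110-intermediate/lesson-1/pedac_practice.py | change_me
-- ===== SOURCE A (Python) =====
-- def is_palindrome(strr):
--     if len(strr) <= 1:
--         return True
--     if strr[0] != strr[-1]:
--         return False
--     return is_palindrome(strr[1:-1])
--
-- def change_me(string):
--     list_of_words = string.split()
--     newstr = ''
--     for ele in list_of_words:
--         if(is_palindrome(ele)):
--             newstr += ele.upper()
--         else:
--             newstr += ele
--         newstr += ' '
--
--     return newstr
-- ===== SOURCE B (Python) =====
-- def is_palindrome(strr):
--     i, j = 0, len(strr) - 1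
--     while i < j:
--         if strr[i] != strr[j]:
--             return False
--         i += 1
--         j -= 1
--     return True
--
-- def change_me(string):
--     return ''.join(
--         (word.upper() if is_palindrome(word) else word) + ' '
--         for word in string.split()
--     )
-- ===== Notes on version B (the rewrite author's own statement) =====
-- stated objective: faster
-- what changed: Palindrome test by an in-place two-pointer index scan instead of recursion that slices a fresh copy of the word at every level (linear instead of quadratic work per word), and the output assembled by a single join over a generator instead of repeated concatenation.
import Mathlib
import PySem

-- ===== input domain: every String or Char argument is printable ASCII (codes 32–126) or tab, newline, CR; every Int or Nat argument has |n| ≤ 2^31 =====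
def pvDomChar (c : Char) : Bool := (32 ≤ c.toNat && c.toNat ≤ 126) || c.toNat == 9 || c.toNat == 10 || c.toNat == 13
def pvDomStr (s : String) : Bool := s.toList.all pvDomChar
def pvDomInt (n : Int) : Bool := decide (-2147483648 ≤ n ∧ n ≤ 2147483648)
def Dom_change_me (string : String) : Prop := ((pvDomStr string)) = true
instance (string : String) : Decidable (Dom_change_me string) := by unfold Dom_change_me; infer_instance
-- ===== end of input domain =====

-- B replaces the slice-per-level recursive palindrome check with a two-pointer index scan and builds the result with a single join: linear instead of quadratic work per word.


-- ===== PORT A =====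
-- is_palindrome: len <= 1 → True; strr[0] != strr[-1] → False; recurse on strr[1:-1]
def is_palindrome (strr : List Char) : Bool :=
  if h : strr.length ≤ 1 then true
  else if PySem.List.pyGetD strr 0 ' ' ≠ PySem.List.pyGetD strr (-1) ' ' then false
  else is_palindrome (PySem.List.slice strr (some 1) (some (-1)))
termination_by strr.length
decreasing_by
  have hne : strr ≠ [] := by intro h'; subst h'; simp at h
  simp [PySem.List.length_slice, PySem.List.clampIdx, hne]
  omega

def change_me (string : String) : String :=
  let list_of_words := PySem.Chars.split₀ string.toList
  let newstr := list_of_words.foldl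
    (fun acc ele =>
      (acc ++ (if is_palindrome ele then PySem.Chars.upper ele else ele)) ++ [' ']) []
  String.ofList newstr

-- ===== PORT B =====
-- two-pointer while loop: i moves right, j moves left
def twoPtr (w : List Char) (i j : Nat) : Bool :=
  if i < j then
    if w.getD i ' ' ≠ w.getD j ' ' then false
    else twoPtr w (i + 1) (j - 1)
  else true
termination_by j - i

def change_me_alt (string : String) : String :=
  String.ofList (PySem.Chars.join []
    ((PySem.Chars.split₀ string.toList).map
      (fun word => (if twoPtr word 0 (word.length - 1) then PySem.Chars.upper word else word) ++ [' '])))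

-- ===== PRECONDITION & SPEC =====
def Spec_change_me (string : String) (out : String) : Prop := out = change_me_alt string
instance (string : String) (out : String) : Decidable (Spec_change_me string out) := by unfold Spec_change_me; infer_instance

-- ===== CLAIM (what is proved, stated in full; the proofs are below) =====
def Claim_equal_change_me : Prop := ∀ (string : String), Dom_change_me string → Spec_change_me string (change_me string)

-- ===== LEMMAS AND PROOFS =====

-- a list of shape x :: m ++ [y] is a palindrome iff x = y and m is
theorem pal_cons_append (x y : Char) (m : List Char) :
    (x :: (m ++ [y]) = (x :: (m ++ [y])).reverse) ↔ (x = y ∧ m = m.reverse) := by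
  have h : (x :: (m ++ [y])).reverse = y :: (m.reverse ++ [x]) := by simp
  rw [h, List.cons.injEq]
  constructor
  · rintro ⟨hx, h2⟩
    subst hx
    exact ⟨rfl, (List.append_left_inj [x]).mp h2⟩
  · rintro ⟨hx, hm⟩
    subst hx
    exact ⟨rfl, by rw [← hm]⟩

-- A's recursive check computes the palindrome predicate
theorem is_palindrome_eq (cs : List Char) :
    is_palindrome cs = decide (cs = cs.reverse) := by
  induction hn : cs.length using Nat.strong_induction_on generalizing cs with
  | _ n ih =>
    subst hn
    rw [is_palindrome]
    by_cases h1 : cs.length ≤ 1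
    · simp only [h1, dite_true]
      match cs, h1 with
      | [], _ => decide
      | [a], _ => simp
    · simp only [h1, dite_false]
      rw [not_le] at h1
      obtain ⟨x, mid, y, rfl⟩ : ∃ x m y, cs = x :: (m ++ [y]) := by
        match cs, h1 with
        | a :: b :: t, _ =>
          obtain ⟨m, y, hm⟩ : ∃ m y, (b :: t : List Char) = m ++ [y] := by
            rcases List.eq_nil_or_concat (b :: t : List Char) with h' | ⟨m, y, h'⟩
            · simp at h'
            · exact ⟨m, y, by simpa using h'⟩
          exact ⟨a, m, y, by rw [hm]⟩
      have hlen : (x :: (mid ++ [y]) : List Char).length = mid.length + 2 := by simp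
      have hslice : PySem.List.slice (x :: (mid ++ [y])) (some 1) (some (-1)) = mid := by
        simp [PySem.List.slice, PySem.List.clampIdx]
        rw [if_neg (by omega)]
        simp
      have hget0 : PySem.List.pyGetD (x :: (mid ++ [y])) 0 ' ' = x :=
        PySem.List.pyGetD_zero_cons ..
      have hgetm1 : PySem.List.pyGetD (x :: (mid ++ [y])) (-1) ' ' = y := by
        have h2 : (x :: (mid ++ [y])) = (x :: mid) ++ [y] := by simp
        rw [h2, PySem.List.pyGetD_neg_one_append_singleton]
      rw [hget0, hgetm1, hslice]
      rw [ih mid.length (by simp) mid rfl]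
      have hdec : decide (x :: (mid ++ [y]) = (x :: (mid ++ [y])).reverse)
          = (decide (x = y) && decide (mid = mid.reverse)) := by
        rw [decide_eq_decide.mpr (pal_cons_append x y mid), Bool.decide_and]
      rw [hdec]
      by_cases hxy : x = y
      · simp [hxy]
      · simp [hxy]

-- B's two-pointer scan over w[i..j] computes the palindrome predicate of that segment
theorem twoPtr_eq (w : List Char) (i j : Nat) (hj : j < w.length) :
    twoPtr w i j = decide ((w.drop i).take (j + 1 - i) = ((w.drop i).take (j + 1 - i)).reverse) := by
  induction hn : j - i using Nat.strong_induction_on generalizing i j with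
  | _ n ih =>
    subst hn
    rw [twoPtr]
    by_cases hij : i < j
    · simp only [hij, if_true]
      have hi : i < w.length := lt_trans hij hj
      -- decompose the segment: w[i] :: middle ++ [w[j]]
      have hseg : (w.drop i).take (j + 1 - i)
          = w[i] :: (((w.drop (i+1)).take (j - (i+1))) ++ [w[j]]) := by
        rw [List.drop_eq_getElem_cons hi]
        have h1 : j + 1 - i = (j - i - 1) + 1 + 1 := by omega
        rw [h1]
        simp only [List.take_succ_cons]
        congr 1
        rw [List.take_add_one]
        have h2 : (w.drop (i+1))[j - i - 1]? = some (w[j]'hj) := by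
          rw [List.getElem?_drop]
          have h4 : i + 1 + (j - i - 1) = j := by omega
          rw [h4, List.getElem?_eq_getElem hj]
        rw [h2]
        have h5 : j - (i+1) = j - i - 1 := by omega
        rw [h5]
        rfl
      have hdec : decide ((w.drop i).take (j + 1 - i) = ((w.drop i).take (j + 1 - i)).reverse)
          = (decide (w[i] = w[j]) && decide ((w.drop (i+1)).take (j - (i+1))
              = ((w.drop (i+1)).take (j - (i+1))).reverse)) := by
        have hiff : ((w.drop i).take (j + 1 - i) = ((w.drop i).take (j + 1 - i)).reverse)
            ↔ (w[i] = w[j]'hj ∧ (w.drop (i+1)).take (j - (i+1))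
                = ((w.drop (i+1)).take (j - (i+1))).reverse) := by
          rw [hseg]
          exact pal_cons_append ..
        rw [decide_eq_decide.mpr hiff, Bool.decide_and]
      rw [hdec]
      have hgi : w.getD i ' ' = w[i] := List.getD_eq_getElem w ' ' hi
      have hgj : w.getD j ' ' = w[j] := List.getD_eq_getElem w ' ' hj
      rw [hgi, hgj]
      by_cases hxy : w[i] = w[j]
      · simp only [hxy, ne_eq, not_true_eq_false, if_false, decide_true, Bool.true_and]
        by_cases hij2 : i + 1 < j
        · rw [ih (j - 1 - (i + 1)) (by omega) (i+1) (j-1) (by omega) (by omega)]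
          have h3 : j - 1 + 1 - (i + 1) = j - (i+1) := by omega
          rw [h3]
        · -- i + 1 = j: middle segment is a singleton, the next call returns true
          rw [twoPtr]
          have hj1 : ¬ (i + 1 < j - 1) := by omega
          simp only [hj1, if_false]
          have hmid : j - (i+1) = 0 := by omega
          rw [hmid]
          simp
      · simp [hxy]
    · simp only [hij, if_false]
      -- segment has length ≤ 1
      match hm : (w.drop i).take (j + 1 - i) with
      | [] => decide
      | [a] => simp
      | a :: b :: t =>
        have hle := List.length_take_le (j + 1 - i) (w.drop i)
        rw [hm] at hle; simp at hle
        omega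

-- the two palindrome checks agree on every word
theorem pal_agree (w : List Char) :
    is_palindrome w = twoPtr w 0 (w.length - 1) := by
  rw [is_palindrome_eq]
  match w with
  | [] => rw [twoPtr]; decide
  | a :: t =>
    rw [twoPtr_eq _ _ _ (by simp)]
    congr 2 <;> simp

-- ''.join with the empty separator is flatten
theorem join_nil_eq_flatten (ps : List (List Char)) :
    PySem.Chars.join [] ps = ps.flatten := by
  induction ps with
  | nil => rfl
  | cons p t ih =>
    match t with
    | [] => simp [PySem.Chars.join_singleton]
    | q :: t' =>
      rw [PySem.Chars.join_cons_cons, ih]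
      simp

-- ===== VERDICT (by name: the statement is the Claim_ definition above) =====
theorem change_me_spec : Claim_equal_change_me := by
  intro s _
  unfold Spec_change_me change_me change_me_alt
  dsimp only
  congr 1
  rw [join_nil_eq_flatten]
  have hassoc : (fun (acc ele : List Char) =>
        (acc ++ (if is_palindrome ele then PySem.Chars.upper ele else ele)) ++ [' '])
      = fun acc ele => acc ++ ((if is_palindrome ele then PySem.Chars.upper ele else ele) ++ [' ']) := by
    funext acc ele
    rw [List.append_assoc]
  rw [hassoc, PySem.List.foldl_append_eq_flatMap, List.flatMap_def, List.nil_append]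
  congr 1
  refine List.map_congr_left (fun w _ => ?_)
  rw [pal_agree]
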